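-- pv_equiv track=rewrite | github.com/KamNoob/workspace | scripts/optimization/task-batcher.py | group_tasks_by_type
-- ===== SOURCE A (Python) =====
-- from typing import List, Dict
--
-- def detect_task_type(task: Dict) -> str:
--     """Detect task type from description."""
--     desc = task.get("description", "").lower()
--     task_name = task.get("task", "").lower()
--
--     # Keywords for each type
--     keywords = {
--         "code": ["code", "develop", "implement", "debug", "refactor", "function", "class"],
--         "research": ["research", "analyze", "study", "investigate", "find", "paper", "article"],
--         "security": ["security", "audit", "threat", "vulnerability", "penetration", "attack"],
--         "documentation": ["document", "guide", "write", "spec", "api", "readme"],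
--         "testing": ["test", "qa", "validate", "check", "verify", "benchmark"],
--         "infrastructure": ["infra", "deploy", "devops", "ci", "cd", "docker", "kubernetes"],
--     }
--
--     text = f"{desc} {task_name}"
--
--     # Find best match
--     scores = {}
--     for task_type, words in keywords.items():
--         score = sum(1 for word in words if word in text)
--         scores[task_type] = score
--
--     if max(scores.values()) > 0:
--         return max(scores, key=scores.get)
--     return "general"
--
-- def group_tasks_by_type(tasks: List[Dict]) -> Dict[str, List[Dict]]:
--     """Group tasks by type."""
--     groups = {}
--     for task in tasks:
--         task_type = detect_task_type(task)
--         if task_type not in groups: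
--             groups[task_type] = []
--         groups[task_type].append(task)
--     return groups
-- ===== SOURCE B (Python) =====
-- from typing import List, Dict
--
-- # (type, keywords) table, in A's priority order; first strictly-better score wins,
-- # which reproduces Python's max(scores, key=scores.get) first-max tie-break.
-- KEYWORDS = [
--     ("code", ["code", "develop", "implement", "debug", "refactor", "function", "class"]),
--     ("research", ["research", "analyze", "study", "investigate", "find", "paper", "article"]),
--     ("security", ["security", "audit", "threat", "vulnerability", "penetration", "attack"]),
--     ("documentation", ["document", "guide", "write", "spec", "api", "readme"]),
--     ("testing", ["test", "qa", "validate", "check", "verify", "benchmark"]),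
--     ("infrastructure", ["infra", "deploy", "devops", "ci", "cd", "docker", "kubernetes"]),
-- ]
--
-- def _score(words, text):
--     return sum(1 for w in words if w in text)
--
-- def _task_type(task):
--     """Single-pass argmax over the keyword table: no score dict, no max() calls."""
--     text = (task.get("description", "") + " " + task.get("task", "")).lower()
--     best, best_score = "general", 0
--     for ty, words in KEYWORDS:
--         s = _score(words, text)
--         if best_score < s:
--             best, best_score = ty, s
--     return best
--
-- def group_tasks_by_type(tasks: List[Dict]) -> Dict[str, List[Dict]]:
--     """Group tasks by type: label every task once, then collect each distinct
--     type's tasks by filtering the labeled list (keys keep first-appearance order)."""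
--     labeled = [(_task_type(t), t) for t in tasks]
--     order = list(dict.fromkeys(ty for ty, _ in labeled))
--     return {ty: [t for l, t in labeled if l == ty] for ty in order}
-- ===== Notes on version B (the rewrite author's own statement) =====
-- stated objective: alternative
-- what changed: Type detection is re-done as a single argmax fold over the keyword table (first strictly better score wins, no score dict and no max() passes), and the grouping no longer accumulates into a mutated dict in one pass: it labels every task once, dedups the labels for the key order, and builds each group by filtering the labeled list.
import Mathlib
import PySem

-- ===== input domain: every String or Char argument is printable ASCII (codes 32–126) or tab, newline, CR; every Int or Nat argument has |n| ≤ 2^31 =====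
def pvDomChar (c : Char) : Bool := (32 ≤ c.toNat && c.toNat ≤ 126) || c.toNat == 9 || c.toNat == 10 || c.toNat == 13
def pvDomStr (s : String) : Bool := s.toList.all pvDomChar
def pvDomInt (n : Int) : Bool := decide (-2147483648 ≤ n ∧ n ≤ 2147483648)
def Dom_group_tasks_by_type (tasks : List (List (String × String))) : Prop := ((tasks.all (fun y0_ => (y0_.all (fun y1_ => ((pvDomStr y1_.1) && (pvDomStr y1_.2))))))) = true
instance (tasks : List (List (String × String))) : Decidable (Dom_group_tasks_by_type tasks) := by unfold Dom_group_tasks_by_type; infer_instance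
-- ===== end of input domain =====

-- B replaces A's score-dict + two max() passes by a single argmax fold over the keyword
-- table (first strictly better score wins), and A's single-pass dict accumulation by
-- label-once / dedup-keys / filter-per-key. Objective: alternative.

-- ===== PORT A =====
def detect_task_type (task : List (String × String)) : String :=
  let desc := PySem.Chars.lower ((PySem.Dict.mk task).getD "description" "").toList
  let tname := PySem.Chars.lower ((PySem.Dict.mk task).getD "task" "").toList
  let keywords : List (String × List String) :=
    [("code", ["code", "develop", "implement", "debug", "refactor", "function", "class"]),
     ("research", ["research", "analyze", "study", "investigate", "find", "paper", "article"]),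
     ("security", ["security", "audit", "threat", "vulnerability", "penetration", "attack"]),
     ("documentation", ["document", "guide", "write", "spec", "api", "readme"]),
     ("testing", ["test", "qa", "validate", "check", "verify", "benchmark"]),
     ("infrastructure", ["infra", "deploy", "devops", "ci", "cd", "docker", "kubernetes"])]
  let text := desc ++ ' ' :: tname
  let scores : PySem.Dict String Int :=
    keywords.foldl
      (fun d p =>
        d.insert p.1 (((p.2.filter (fun w => PySem.Chars.isIn w.toList text)).map (fun _ => (1 : Int))).sum))
      PySem.Dict.empty
  -- max(scores.values()) / max(scores, key=scores.get): scores always has 6 entries,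
  -- so the defaults handed to maxD are never reached
  if 0 < PySem.List.maxD scores.values (fun v => v) 0 then
    PySem.List.maxD scores.keys (fun k => scores.getD k 0) "general"
  else "general"

def group_tasks_by_type (tasks : List (List (String × String))) : List (String × List (List (String × String))) :=
  (tasks.foldl
    (fun groups task =>
      let task_type := detect_task_type task
      let groups := if groups.contains task_type then groups else groups.insert task_type []
      groups.modify task_type [] (fun g => g ++ [task]))
    PySem.Dict.empty).items

-- ===== PORT B =====
-- Source B's module-level KEYWORDS table
def pvKeywords : List (String × List String) :=
  [("code", ["code", "develop", "implement", "debug", "refactor", "function", "class"]),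
   ("research", ["research", "analyze", "study", "investigate", "find", "paper", "article"]),
   ("security", ["security", "audit", "threat", "vulnerability", "penetration", "attack"]),
   ("documentation", ["document", "guide", "write", "spec", "api", "readme"]),
   ("testing", ["test", "qa", "validate", "check", "verify", "benchmark"]),
   ("infrastructure", ["infra", "deploy", "devops", "ci", "cd", "docker", "kubernetes"])]

-- Source B's _score
def pvScore (words : List String) (text : List Char) : Int :=
  ((words.filter (fun w => PySem.Chars.isIn w.toList text)).map (fun _ => (1 : Int))).sum

-- Source B's _task_type: one argmax pass over the table, keeping the first strictly better score
def pvTaskType (task : List (String × String)) : String :=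
  let text := PySem.Chars.lower
    (((PySem.Dict.mk task).getD "description" "").toList ++ ' ' :: ((PySem.Dict.mk task).getD "task" "").toList)
  (pvKeywords.foldl
    (fun best p =>
      let s := pvScore p.2 text
      if best.2 < s then (p.1, s) else best)
    ("general", (0 : Int))).1

def group_tasks_by_type_alt (tasks : List (List (String × String))) : List (String × List (List (String × String))) :=
  let labeled := tasks.map (fun t => (pvTaskType t, t))
  let order := PySem.List.dedup (labeled.map (fun p => p.1))
  order.map (fun ty => (ty, (labeled.filter (fun p => p.1 == ty)).map (fun p => p.2)))

-- ===== PRECONDITION & SPEC =====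
def Spec_group_tasks_by_type (tasks : List (List (String × String))) (out : List (String × List (List (String × String)))) : Prop := out = group_tasks_by_type_alt tasks
instance (tasks : List (List (String × String))) (out : List (String × List (List (String × String)))) : Decidable (Spec_group_tasks_by_type tasks out) := by unfold Spec_group_tasks_by_type; infer_instance

-- ===== CLAIM (what is proved, stated in full; the proofs are below) =====
def Claim_equal_group_tasks_by_type : Prop := ∀ (tasks : List (List (String × String))), Dom_group_tasks_by_type tasks → Spec_group_tasks_by_type tasks (group_tasks_by_type tasks)

-- ===== LEMMAS AND PROOFS =====

-- every score is a count, hence nonnegative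
theorem pvScore_nonneg (words : List String) (text : List Char) : 0 ≤ pvScore words text := by
  unfold pvScore
  rw [PySem.List.sum_map_const_int]
  positivity

-- the value carried by B's argmax fold is the running maximum of the scores
theorem bfold_snd (ls : List (String × Int)) :
    ∀ (b : String × Int),
      (ls.foldl (fun best p => if best.2 < p.2 then p else best) b).2
        = (ls.map Prod.snd).foldl max b.2 := by
  induction ls with
  | nil => intro b; rfl
  | cons p t ih =>
    intro b
    simp only [List.foldl_cons, List.map_cons]
    rw [ih]
    congr 1
    rw [max_def]
    split_ifs <;> omega

-- B's argmax fold either never replaces its start or strictly increases its value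
theorem bfold_stay (ls : List (String × Int)) :
    ∀ (b : String × Int),
      (ls.foldl (fun best p => if best.2 < p.2 then p else best) b) = b
      ∨ b.2 < (ls.foldl (fun best p => if best.2 < p.2 then p else best) b).2 := by
  induction ls with
  | nil => intro b; left; rfl
  | cons p t ih =>
    intro b
    simp only [List.foldl_cons]
    by_cases h : b.2 < p.2
    · right
      rw [if_pos h]
      rcases ih p with h2 | h2
      · rw [h2]; exact h
      · exact lt_trans h h2
    · rw [if_neg h]; exact ih b

-- A's max(scores, key=scores.get) over the keys agrees with B's argmax fold over the
-- pairs, whenever the running best score is positive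
theorem argmax_fold_eq (g : String → Int) (ls : List (String × Int)) :
    ∀ (j : String) (b : String × Int),
      (∀ p ∈ ls, g p.1 = p.2) → g j = b.2 → (0 < b.2 → j = b.1) →
      (0 < (ls.foldl (fun best p => if best.2 < p.2 then p else best) b).2) →
      PySem.List.max? (j :: ls.map Prod.fst) g
        = some ((ls.foldl (fun best p => if best.2 < p.2 then p else best) b).1) := by
  induction ls with
  | nil =>
    intro j b _ hjv hj hpos
    simp only [List.foldl_nil] at hpos ⊢
    simp only [List.map_nil, PySem.List.max?, List.foldl_cons, List.foldl_nil]
    rw [hj hpos]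
  | cons p t ih =>
    intro j b hg hjv hj hpos
    have hp : g p.1 = p.2 := hg p (List.mem_cons_self ..)
    have hstep : PySem.List.max? (j :: p.1 :: t.map Prod.fst) g
        = PySem.List.max? ((if g j < g p.1 then p.1 else j) :: t.map Prod.fst) g := by
      simp only [PySem.List.max?, List.foldl_cons]
      by_cases h : g j < g p.1 <;> simp [h]
    simp only [List.map_cons, List.foldl_cons] at hpos ⊢
    rw [hstep, hjv, hp]
    by_cases h : b.2 < p.2
    · simp only [if_pos h] at hpos ⊢
      exact ih p.1 p (fun q hq => hg q (List.mem_cons_of_mem _ hq)) hp (fun _ => rfl) hpos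
    · simp only [if_neg h] at hpos ⊢
      exact ih j b (fun q hq => hg q (List.mem_cons_of_mem _ hq)) hjv hj hpos

-- core of the detection equivalence, for a generic nonempty keyword table
theorem detect_core (p0 : String × List String) (kt : List (String × List String)) (text : List Char)
    (hnd : (((p0 :: kt).map Prod.fst)).Nodup) :
    (if 0 < PySem.List.maxD ((p0 :: kt).foldl (fun d p => d.insert p.1 (pvScore p.2 text)) PySem.Dict.empty).values (fun v => v) 0 then
       PySem.List.maxD ((p0 :: kt).foldl (fun d p => d.insert p.1 (pvScore p.2 text)) PySem.Dict.empty).keys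
         (fun k => ((p0 :: kt).foldl (fun d p => d.insert p.1 (pvScore p.2 text)) PySem.Dict.empty).getD k 0) "general"
     else "general")
    = ((p0 :: kt).foldl
        (fun best p => let s := pvScore p.2 text; if best.2 < s then (p.1, s) else best)
        ("general", (0 : Int))).1 := by
  have hs0 : 0 ≤ pvScore p0.2 text := pvScore_nonneg _ _
  -- the score dict is a row of fresh inserts: its items are exactly the labeled pairs
  have hitems : ((p0 :: kt).foldl (fun d p => d.insert p.1 (pvScore p.2 text)) PySem.Dict.empty).items
      = (p0 :: kt).map (fun p => (p.1, pvScore p.2 text)) := by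
    rw [PySem.Dict.items_foldl_insert_fresh (p0 :: kt) Prod.fst (fun p => pvScore p.2 text)
      PySem.Dict.empty (fun a _ => PySem.Dict.contains_empty _) hnd]
    simp [PySem.Dict.empty]
  have hndk : ((p0 :: kt).foldl (fun d p => d.insert p.1 (pvScore p.2 text)) PySem.Dict.empty).keys.Nodup := by
    simp only [PySem.Dict.keys, hitems, List.map_map]
    simpa using hnd
  have hg : ∀ q ∈ (p0 :: kt).map (fun p => (p.1, pvScore p.2 text)),
      ((p0 :: kt).foldl (fun d p => d.insert p.1 (pvScore p.2 text)) PySem.Dict.empty).getD q.1 0 = q.2 :=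
    fun q hq => PySem.Dict.getD_of_mem_items _ (hitems ▸ hq) hndk 0
  -- B's fold, as a fold over the labeled pairs
  have hB : (p0 :: kt).foldl
        (fun best p => let s := pvScore p.2 text; if best.2 < s then (p.1, s) else best)
        ("general", (0 : Int))
      = ((p0 :: kt).map (fun p => (p.1, pvScore p.2 text))).foldl
          (fun best p => if best.2 < p.2 then p else best) ("general", (0 : Int)) := by
    rw [List.foldl_map]
  rw [hB]
  -- A's max(scores.values()) is the value carried by B's fold
  have hmaxv : PySem.List.maxD ((p0 :: kt).foldl (fun d p => d.insert p.1 (pvScore p.2 text)) PySem.Dict.empty).values (fun v => v) 0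
      = (((p0 :: kt).map (fun p => (p.1, pvScore p.2 text))).foldl
          (fun best p => if best.2 < p.2 then p else best) ("general", (0 : Int))).2 := by
    simp only [PySem.Dict.values, hitems, List.map_map, List.map_cons]
    rw [PySem.List.maxD, PySem.List.max?_id_cons, Option.getD_some]
    rw [bfold_snd]
    simp only [List.map_cons, List.map_map, List.foldl_cons]
    congr 1
    exact (max_eq_right hs0).symm
  rw [hmaxv]
  by_cases hpos : 0 < (((p0 :: kt).map (fun p => (p.1, pvScore p.2 text))).foldl
      (fun best p => if best.2 < p.2 then p else best) ("general", (0 : Int))).2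
  · rw [if_pos hpos]
    -- positive best score: A's key scan returns exactly B's argmax
    have hb1 : ((p0 :: kt).map (fun p => (p.1, pvScore p.2 text))).foldl
          (fun best p => if best.2 < p.2 then p else best) ("general", (0 : Int))
        = (kt.map (fun p => (p.1, pvScore p.2 text))).foldl
            (fun best p => if best.2 < p.2 then p else best)
            (if (0:Int) < pvScore p0.2 text then (p0.1, pvScore p0.2 text) else ("general", 0)) := by
      simp only [List.map_cons, List.foldl_cons]
    have hmain := argmax_fold_eq
      (fun k => ((p0 :: kt).foldl (fun d p => d.insert p.1 (pvScore p.2 text)) PySem.Dict.empty).getD k 0)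
      (kt.map (fun p => (p.1, pvScore p.2 text))) p0.1
      (if (0:Int) < pvScore p0.2 text then (p0.1, pvScore p0.2 text) else ("general", 0))
      (fun q hq => hg q (List.mem_cons_of_mem _ hq))
      (by
        have h0 := hg (p0.1, pvScore p0.2 text) (by simp)
        by_cases h : (0:Int) < pvScore p0.2 text
        · rw [if_pos h]; exact h0
        · rw [if_neg h]
          show ((p0 :: kt).foldl (fun d p => d.insert p.1 (pvScore p.2 text)) PySem.Dict.empty).getD p0.1 0 = (0:Int)
          rw [h0]
          omega)
      (by
        intro h
        by_cases hc : (0:Int) < pvScore p0.2 text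
        · rw [if_pos hc]
        · rw [if_neg hc] at h
          norm_num at h)
      (by rw [← hb1]; exact hpos)
    rw [hb1]
    have hkeys2 : ((p0 :: kt).foldl (fun d p => d.insert p.1 (pvScore p.2 text)) PySem.Dict.empty).keys
        = p0.1 :: (kt.map (fun p => (p.1, pvScore p.2 text))).map Prod.fst := by
      simp only [PySem.Dict.keys, hitems, List.map_cons]
    rw [hkeys2]
    simp only [PySem.List.maxD]
    rw [hmain, Option.getD_some]
  · rw [if_neg hpos]
    -- best score zero: B's fold never replaced its ("general", 0) start
    have hs00 : pvScore p0.2 text = 0 := by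
      by_contra hne
      have h : (0:Int) < pvScore p0.2 text := lt_of_le_of_ne hs0 (Ne.symm hne)
      have hb1 : ((p0 :: kt).map (fun p => (p.1, pvScore p.2 text))).foldl
            (fun best p => if best.2 < p.2 then p else best) ("general", (0 : Int))
          = (kt.map (fun p => (p.1, pvScore p.2 text))).foldl
              (fun best p => if best.2 < p.2 then p else best) (p0.1, pvScore p0.2 text) := by
        simp only [List.map_cons, List.foldl_cons]
        rw [if_pos h]
      rcases bfold_stay (kt.map (fun p => (p.1, pvScore p.2 text))) (p0.1, pvScore p0.2 text) with h2 | h2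
      · exact hpos (by rw [hb1, h2]; exact h)
      · exact hpos (by rw [hb1]; exact lt_trans h h2)
    have hb1 : ((p0 :: kt).map (fun p => (p.1, pvScore p.2 text))).foldl
          (fun best p => if best.2 < p.2 then p else best) ("general", (0 : Int))
        = (kt.map (fun p => (p.1, pvScore p.2 text))).foldl
            (fun best p => if best.2 < p.2 then p else best) ("general", (0 : Int)) := by
      simp only [List.map_cons, List.foldl_cons]
      rw [hs00]
      norm_num
    rcases bfold_stay (kt.map (fun p => (p.1, pvScore p.2 text))) ("general", (0:Int)) with h2 | h2
    · rw [hb1, h2]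
    · exact absurd (hb1 ▸ h2) hpos

-- 'lower' of the concatenation is the concatenation of the 'lower's
theorem lower_append_space (a b : List Char) :
    PySem.Chars.lower (a ++ ' ' :: b) = PySem.Chars.lower a ++ ' ' :: PySem.Chars.lower b := by
  simp [PySem.Chars.lower, PySem.Chars.lowerChar]
  decide

-- the two detection routines agree on every task
theorem detect_eq (task : List (String × String)) : detect_task_type task = pvTaskType task := by
  unfold detect_task_type pvTaskType pvKeywords
  rw [lower_append_space]
  exact detect_core _ _ _ (by decide)

-- A's "setdefault-then-append" step is one modify with default []
theorem setdefault_modify_step {ν : Type} (d : PySem.Dict String (List ν)) (k : String) (f : List ν → List ν) :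
    ((if d.contains k then d else d.insert k []).modify k [] f) = d.modify k [] f := by
  by_cases h : d.contains k = true
  · simp [h]
  · simp only [h, Bool.false_eq_true, if_false]
    simp [PySem.Dict.modify, PySem.Dict.getD_insert_self, PySem.Dict.insert_insert_self,
      PySem.Dict.getD_of_not_contains d ([] : List ν) (by simpa using h)]

theorem group_eq_lemma : ∀ tasks, group_tasks_by_type tasks = group_tasks_by_type_alt tasks := by
  intro tasks
  unfold group_tasks_by_type group_tasks_by_type_alt
  -- replace A's two-step body by a single modify, then fold over the labeled pairs
  have hstep :
      tasks.foldl
        (fun groups task =>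
          let task_type := detect_task_type task
          let groups := if groups.contains task_type then groups else groups.insert task_type []
          groups.modify task_type [] (fun g => g ++ [task]))
        PySem.Dict.empty
      = (tasks.map (fun t => (pvTaskType t, t))).foldl
          (fun d p => d.modify p.1 [] (fun g => g ++ [p.2])) PySem.Dict.empty := by
    rw [List.foldl_map]
    exact PySem.List.foldl_congr_mem tasks _ _ _
      (fun d t _ => by rw [detect_eq]; exact setdefault_modify_step d (pvTaskType t) _)
  rw [hstep]
  set labeled := tasks.map (fun t => (pvTaskType t, t)) with hlab
  have hnodup :
      ((labeled.foldl (fun d p => d.modify p.1 [] (fun g => g ++ [p.2])) PySem.Dict.empty).keys).Nodup := by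
    exact PySem.Dict.nodup_keys_foldl_modify_key labeled (fun p => p.1) [] (fun d p g => g ++ [p.2])
      PySem.Dict.empty (by simp [PySem.Dict.keys_empty])
  rw [PySem.Dict.items_eq_map_keys _ hnodup []]
  have hkeys :
      (labeled.foldl (fun d p => d.modify p.1 [] (fun g => g ++ [p.2])) PySem.Dict.empty).keys
      = PySem.List.dedup (labeled.map (fun p => p.1)) := by
    rw [PySem.Dict.keys_foldl_modify_key labeled (fun p => p.1) [] (fun d p g => g ++ [p.2])]
    simp [PySem.Dict.keys_empty, PySem.Set.update_nil_left, PySem.List.dedup_eq_ofList]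
  rw [hkeys]
  refine List.map_congr_left (fun ty _ => ?_)
  rw [PySem.Dict.getD_foldl_modify_append labeled PySem.Dict.empty ty]
  simp [PySem.Dict.getD_empty]

-- ===== VERDICT (by name: the statement is the Claim_ definition above) =====
theorem group_tasks_by_type_spec : Claim_equal_group_tasks_by_type :=
  fun tasks _ => group_eq_lemma tasks
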